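-- pv_equiv track=rewrite | github.com/yeoeoeonju/BOJautoPush | 프로그래머스/0/120843. 공 던지기/공 던지기.py | solution
-- ===== SOURCE A (Python) =====
-- def solution(numbers, k):
--
--
--     if len(numbers) % 2 == 0:
--         even_numbers = []
--
--         for i in range(0, len(numbers), 2) :
--             even_numbers.append(numbers[i])
--
--         return even_numbers[(k % len(even_numbers)) -1]
--
--     else :
--         odd_numbers = []
--
--         for i in range(2) :
--             for j in range(i, len(numbers), 2) :
--                 odd_numbers.append(numbers[j])
--
--         return odd_numbers[(k % len(odd_numbers)) -1]
-- ===== SOURCE B (Python) =====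
-- def solution(numbers, k):
--     n = len(numbers)
--     m = n if n % 2 else n // 2
--     return numbers[(2 * ((k - 1) % m)) % n]
-- ===== Notes on version B (the rewrite author's own statement) =====
-- stated objective: faster
-- what changed: Replaces A's even/odd branch that materialises the whole catching order list and then indexes it with a single O(1) closed-form index: the t-th catcher is numbers[(2*t) % n] with cycle length n (odd n) or n//2 (even n), so B returns numbers[(2*((k-1) % m)) % n] directly.
import Mathlib
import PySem

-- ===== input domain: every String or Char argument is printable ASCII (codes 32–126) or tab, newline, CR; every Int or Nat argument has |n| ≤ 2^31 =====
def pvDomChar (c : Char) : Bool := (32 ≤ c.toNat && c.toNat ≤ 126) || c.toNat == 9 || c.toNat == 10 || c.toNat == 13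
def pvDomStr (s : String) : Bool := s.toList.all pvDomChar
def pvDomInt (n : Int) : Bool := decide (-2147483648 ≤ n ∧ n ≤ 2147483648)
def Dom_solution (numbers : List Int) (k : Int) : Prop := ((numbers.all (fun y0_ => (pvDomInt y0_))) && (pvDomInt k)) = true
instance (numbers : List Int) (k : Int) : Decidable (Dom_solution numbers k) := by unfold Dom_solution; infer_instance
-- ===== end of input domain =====

-- B replaces A's even/odd order-list construction with a single closed-form index
-- numbers[(2*((k-1) % m)) % n]; equivalence is proved for all nonempty lists.

-- ===== PORT A =====
def solution (numbers : List Int) (k : Int) : Int :=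
  if PySem.Int.mod (PySem.List.len numbers) 2 = 0 then
    let evens := (PySem.List.pyRange 0 (PySem.List.len numbers) 2).foldl
      (fun acc i => acc ++ [PySem.List.pyGetD numbers i 0]) []
    PySem.List.pyGetD evens (PySem.Int.mod k (PySem.List.len evens) - 1) 0
  else
    let odds := (PySem.List.pyRange 0 2 1).foldl
      (fun acc i => (PySem.List.pyRange i (PySem.List.len numbers) 2).foldl
        (fun acc2 j => acc2 ++ [PySem.List.pyGetD numbers j 0]) acc) []
    PySem.List.pyGetD odds (PySem.Int.mod k (PySem.List.len odds) - 1) 0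

-- ===== PORT B =====
def solution_alt (numbers : List Int) (k : Int) : Int :=
  let n := PySem.List.len numbers
  let m := if PySem.Int.mod n 2 ≠ 0 then n else PySem.Int.floordiv n 2
  PySem.List.pyGetD numbers (PySem.Int.mod (2 * PySem.Int.mod (k - 1) m) n) 0

-- ===== PRECONDITION & SPEC =====
-- A raises ZeroDivisionError on the empty list (k % 0); B raises there too.
def Pre_solution (numbers : List Int) (k : Int) : Prop := numbers ≠ []
instance (numbers : List Int) (k : Int) : Decidable (Pre_solution numbers k) := by
  unfold Pre_solution; infer_instance

def pvWitness_solution : List Int × Int := ([3, 5, 7], 2)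

def Spec_solution (numbers : List Int) (k : Int) (out : Int) : Prop := out = solution_alt numbers k
instance (numbers : List Int) (k : Int) (out : Int) : Decidable (Spec_solution numbers k out) := by
  unfold Spec_solution; infer_instance

-- ===== CLAIM (what is proved, stated in full; the proofs are below) =====
def Claim_equal_solution : Prop := ∀ (numbers : List Int) (k : Int), Dom_solution numbers k → Pre_solution numbers k → Spec_solution numbers k (solution numbers k)

-- ===== LEMMAS AND PROOFS =====

-- Python's xs[(k % len(xs)) - 1] (index -1 wraps to the last element) is xs[(k-1) mod len].
theorem pyGetD_modIdx (xs : List Int) (k : Int) (hx : xs ≠ []) :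
    PySem.List.pyGetD xs (PySem.Int.mod k (PySem.List.len xs) - 1) 0
      = xs.getD (((k - 1) % (xs.length : Int)).toNat) 0 := by
  have hlen : 0 < xs.length := List.length_pos_iff.mpr hx
  have hL : (0 : Int) < (xs.length : Int) := by exact_mod_cast hlen
  rw [PySem.List.len_eq, PySem.Int.mod_eq_emod_of_pos hL]
  have hr0 : 0 ≤ k % (xs.length : Int) := Int.emod_nonneg k (by omega)
  have hr1 : k % (xs.length : Int) < (xs.length : Int) := Int.emod_lt_of_pos k hL
  have hsub : (k - 1) % (xs.length : Int)
      = (k % (xs.length : Int) - 1) % (xs.length : Int) := by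
    rw [Int.sub_emod k 1, Int.sub_emod (k % (xs.length : Int)) 1,
        Int.emod_emod_of_dvd k (dvd_refl _)]
  by_cases h0 : k % (xs.length : Int) = 0
  · have hidx : (k - 1) % (xs.length : Int) = (xs.length : Int) - 1 := by
      rw [hsub, h0, show (0 : Int) - 1 = -1 by ring,
          ← Int.add_mul_emod_self_left (-1) (xs.length : Int) 1,
          show (-1 + (xs.length : Int) * 1) = (xs.length : Int) - 1 by ring,
          Int.emod_eq_of_lt (by omega) (by omega)]
    rw [h0, hidx, show (0 : Int) - 1 = -1 by ring,
        PySem.List.pyGetD_neg_one xs 0 hx, List.getLast_eq_getElem,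
        List.getD_eq_getElem _ _ (by omega)]
    congr 1
    omega
  · have hidx : (k - 1) % (xs.length : Int) = k % (xs.length : Int) - 1 := by
      rw [hsub, Int.emod_eq_of_lt (by omega) (by omega)]
    rw [hidx, PySem.List.pyGetD_eq_getElem xs 0 (by omega) (by omega),
        List.getD_eq_getElem _ _ (by omega)]

theorem solution_spec : Claim_equal_solution := by
  intro numbers k _hdom hpre
  unfold Spec_solution solution solution_alt
  have hx : numbers ≠ [] := hpre
  have hlen : 0 < numbers.length := List.length_pos_iff.mpr hx
  have hL : (0 : Int) < (numbers.length : Int) := by exact_mod_cast hlen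
  simp only [PySem.List.len_eq]
  rw [PySem.Int.mod_eq_emod_of_pos (a := (numbers.length : Int)) (b := 2) (by omega)]
  by_cases hev : (numbers.length : Int) % 2 = 0
  · -- even length
    rw [if_pos hev, if_neg (by omega : ¬ (numbers.length : Int) % 2 ≠ 0),
        PySem.List.foldl_append_singleton_eq_map, List.nil_append,
        PySem.List.pyRange_of_pos 0 (numbers.length : Int) (by omega),
        List.map_map]
    simp only [Function.comp_def]
    set M : Nat := (if (0:Int) < (numbers.length : Int) then (((numbers.length : Int) - 0 + 2 - 1) / 2).toNat else 0) with hM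
    have hMval : M = numbers.length / 2 := by rw [hM, if_pos hL]; omega
    have hMpos : 0 < M := by omega
    set evens := (List.range M).map (fun (t : Nat) => PySem.List.pyGetD numbers (0 + 2 * (t : Int)) 0) with hevens
    have hlenE : evens.length = M := by simp [hevens]
    have hne : evens ≠ [] := by
      intro h; rw [h] at hlenE; simp at hlenE; omega
    have hkey := pyGetD_modIdx evens k hne
    rw [PySem.List.len_eq] at hkey
    rw [hkey, hlenE]
    set t : Nat := ((k - 1) % (M : Int)).toNat with ht
    have htb : t < M := by
      have h1 := Int.emod_lt_of_pos (k - 1) (b := (M : Int)) (by exact_mod_cast hMpos)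
      have h2 := Int.emod_nonneg (k - 1) (b := (M : Int)) (by positivity)
      omega
    rw [hevens, PySem.List.getD_map_range _ _ _ _ htb]
    -- B side index
    rw [PySem.Int.floordiv_eq_ediv_of_pos (by omega : (0:Int) < 2),
        PySem.Int.mod_eq_emod_of_pos (a := k - 1) (by omega),
        PySem.Int.mod_eq_emod_of_pos (a := 2 * ((k - 1) % ((numbers.length : Int) / 2))) (by omega)]
    have hmM : (numbers.length : Int) / 2 = (M : Int) := by omega
    rw [hmM]
    have he : 2 * ((k - 1) % (M : Int)) = (0 : Int) + 2 * (t : Int) := by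
      have h2 := Int.emod_nonneg (k - 1) (b := (M : Int)) (by positivity)
      omega
    rw [he, Int.emod_eq_of_lt (by omega) (by omega)]
  · -- odd length
    have hodd : (numbers.length : Int) % 2 = 1 := by omega
    rw [if_neg (by omega : ¬ (numbers.length : Int) % 2 = 0),
        if_pos (by omega : (numbers.length : Int) % 2 ≠ 0),
        show PySem.List.pyRange 0 2 1 = [0, 1] by decide]
    simp only [List.foldl_cons, List.foldl_nil]
    rw [PySem.List.foldl_append_singleton_eq_map,
        PySem.List.foldl_append_singleton_eq_map, List.nil_append,
        PySem.List.pyRange_of_pos 0 (numbers.length : Int) (by omega),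
        PySem.List.pyRange_of_pos 1 (numbers.length : Int) (by omega),
        List.map_map, List.map_map]
    simp only [Function.comp_def]
    set M0 : Nat := (if (0:Int) < (numbers.length : Int) then (((numbers.length : Int) - 0 + 2 - 1) / 2).toNat else 0) with hM0
    set M1 : Nat := (if (1:Int) < (numbers.length : Int) then (((numbers.length : Int) - 1 + 2 - 1) / 2).toNat else 0) with hM1
    have hM0v : M0 = (numbers.length + 1) / 2 := by rw [hM0, if_pos hL]; omega
    have hM1v : M1 = numbers.length / 2 := by rw [hM1]; split <;> omega
    set odds := ((List.range M0).map (fun (t : Nat) => PySem.List.pyGetD numbers (0 + 2 * (t : Int)) 0))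
        ++ ((List.range M1).map (fun (t : Nat) => PySem.List.pyGetD numbers (1 + 2 * (t : Int)) 0)) with hodds
    have hlenO : odds.length = numbers.length := by
      simp only [hodds, List.length_append, List.length_map, List.length_range]
      omega
    have hne : odds ≠ [] := by
      intro h; rw [h] at hlenO; simp at hlenO; omega
    have hkey := pyGetD_modIdx odds k hne
    rw [PySem.List.len_eq] at hkey
    rw [hkey, hlenO]
    set t : Nat := ((k - 1) % (numbers.length : Int)).toNat with ht
    have htb : t < numbers.length := by
      have h1 := Int.emod_lt_of_pos (k - 1) hL
      have h2 := Int.emod_nonneg (k - 1) (b := (numbers.length : Int)) (by omega)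
      omega
    -- B side index: (2 * ((k-1) % n)) % n
    rw [PySem.Int.mod_eq_emod_of_pos (a := k - 1) (by omega),
        PySem.Int.mod_eq_emod_of_pos (a := 2 * ((k - 1) % (numbers.length : Int))) (by omega)]
    have he : 2 * ((k - 1) % (numbers.length : Int)) = 2 * (t : Int) := by
      have h2 := Int.emod_nonneg (k - 1) (b := (numbers.length : Int)) (by omega)
      omega
    rw [he]
    by_cases hsmall : t < M0
    · have h2t : 2 * (t : Int) < (numbers.length : Int) := by omega
      rw [Int.emod_eq_of_lt (by omega) h2t]
      rw [hodds, List.getD_append _ _ _ t (by simpa using hsmall),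
          PySem.List.getD_map_range _ _ _ _ hsmall]
      norm_num
    · have hge : M0 ≤ t := by omega
      have h2t : (numbers.length : Int) ≤ 2 * (t : Int) := by omega
      have hmod : (2 * (t : Int)) % (numbers.length : Int)
          = 2 * (t : Int) - (numbers.length : Int) := by
        have h := Int.add_mul_emod_self_left (2 * (t : Int) - (numbers.length : Int)) (numbers.length : Int) 1
        rw [show 2 * (t : Int) - (numbers.length : Int) + (numbers.length : Int) * 1 = 2 * (t : Int) by ring] at h
        rw [h, Int.emod_eq_of_lt (by omega) (by omega)]
      rw [hmod]
      rw [hodds, List.getD_append_right _ _ _ _ (by simpa using hge)]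
      simp only [List.length_map, List.length_range]
      rw [PySem.List.getD_map_range _ _ _ _ (by omega : t - M0 < M1)]
      congr 1
      omega
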